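-- pv_equiv track=rewrite | github.com/ekatellv/practice_14 | ex_12.py | count_hole_letters
-- ===== SOURCE A (Python) =====
-- def count_hole_letters(text: str) -> tuple[int, int]:
--     """
--     Counts letters with holes and without holes in the given text.
--
--     Args:
--         text (str): Input text to analyze. Should contain lowercase letters and spaces.
--
--     Returns:
--         tuple[int, int]: A tuple containing:
--             - hole_count: Number of letters with holes
--             - no_hole_count: Number of letters without holes
--     """
--     hole_letters = {'a', 'b', 'd', 'e', 'g', 'o', 'p', 'q'}
--
--     hole_count = 0
--     no_hole_count = 0
--
--     for char in text:
--         if char.isalpha():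
--             if char in hole_letters:
--                 hole_count += 1
--             else:
--                 no_hole_count += 1
--
--     return hole_count, no_hole_count
-- ===== SOURCE B (Python) =====
-- def count_hole_letters(text: str) -> tuple[int, int]:
--     """Counts letters with holes and without holes via a frequency table."""
--     counts = {}
--     for ch in text:
--         counts[ch] = counts.get(ch, 0) + 1
--
--     hole_letters = {'a', 'b', 'd', 'e', 'g', 'o', 'p', 'q'}
--
--     hole_count = 0
--     no_hole_count = 0
--     for ch, n in counts.items():
--         if ch in hole_letters:
--             hole_count += n
--         elif ch.isalpha():
--             no_hole_count += n
--
--     return hole_count, no_hole_count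
-- ===== Notes on version B (the rewrite author's own statement) =====
-- stated objective: alternative
-- what changed: B first builds a frequency table of the text in one pass and then classifies each DISTINCT character once, summing its count into the hole/no-hole totals, instead of classifying every character occurrence individually.
import Mathlib
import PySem

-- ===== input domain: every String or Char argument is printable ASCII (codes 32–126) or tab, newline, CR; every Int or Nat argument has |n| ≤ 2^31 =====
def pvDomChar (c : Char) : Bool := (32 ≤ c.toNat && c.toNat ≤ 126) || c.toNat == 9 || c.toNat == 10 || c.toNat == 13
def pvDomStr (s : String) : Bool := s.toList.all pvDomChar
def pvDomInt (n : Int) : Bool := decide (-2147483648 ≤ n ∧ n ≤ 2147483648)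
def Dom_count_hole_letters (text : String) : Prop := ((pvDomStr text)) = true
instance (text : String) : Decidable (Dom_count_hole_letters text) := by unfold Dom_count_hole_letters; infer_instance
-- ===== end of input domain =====

-- B replaces A's per-occurrence classification by a frequency table over the text followed by
-- one classification per distinct character (alternative decomposition, same cost).
-- ===== PORT A =====
-- shared literal data: the hole-letter set {'a','b','d','e','g','o','p','q'}
def pvHoles : PySem.Set Char := PySem.Set.ofList ['a','b','d','e','g','o','p','q']

def count_hole_letters (text : String) : Int × Int :=
  text.toList.foldl (fun acc ch =>
    if PySem.Chars.isalpha ch then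
      if pvHoles.contains ch then (acc.1 + 1, acc.2) else (acc.1, acc.2 + 1)
    else acc) (0, 0)

-- ===== PORT B =====
def count_hole_letters_alt (text : String) : Int × Int :=
  let counts : PySem.Dict Char Int :=
    text.toList.foldl (fun d ch => d.insert ch (d.getD ch 0 + 1)) PySem.Dict.empty
  counts.items.foldl (fun acc kv =>
    if pvHoles.contains kv.1 then (acc.1 + kv.2, acc.2)
    else if PySem.Chars.isalpha kv.1 then (acc.1, acc.2 + kv.2)
    else acc) (0, 0)
-- ===== PRECONDITION & SPEC =====
def Spec_count_hole_letters (text : String) (out : Int × Int) : Prop := out = count_hole_letters_alt text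
instance (text : String) (out : Int × Int) : Decidable (Spec_count_hole_letters text out) := by unfold Spec_count_hole_letters; infer_instance

-- ===== CLAIM (what is proved, stated in full; the proofs are below) =====
def Claim_equal_count_hole_letters : Prop := ∀ (text : String), Dom_count_hole_letters text → Spec_count_hole_letters text (count_hole_letters text)

-- ===== LEMMAS AND PROOFS =====


-- hole letters are alphabetic
lemma pvHoles_alpha (c : Char) (h : pvHoles.contains c = true) : PySem.Chars.isalpha c = true := by
  have hm : c ∈ (pvHoles : List Char) := by
    simpa [PySem.Set.contains] using h
  have hall : (pvHoles : List Char).all PySem.Chars.isalpha = true := by decide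
  exact List.all_eq_true.mp hall c hm

-- A's fold adds one per occurrence, split by class
lemma foldA (xs : List Char) (h n : Int) :
    xs.foldl (fun acc ch =>
      if PySem.Chars.isalpha ch then
        if pvHoles.contains ch then (acc.1 + 1, acc.2) else (acc.1, acc.2 + 1)
      else acc) (h, n)
    = (h + (xs.countP (fun c => pvHoles.contains c) : Int),
       n + (xs.countP (fun c => PySem.Chars.isalpha c && !pvHoles.contains c) : Int)) := by
  induction xs generalizing h n with
  | nil => simp
  | cons c t ih =>
    rw [List.foldl_cons, List.countP_cons, List.countP_cons]
    by_cases ha : PySem.Chars.isalpha c = true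
    · by_cases hc : pvHoles.contains c = true
      · rw [if_pos ha, if_pos hc, ih, hc, ha]
        simp [Prod.ext_iff]; omega
      · have hc' : pvHoles.contains c = false := by
          revert hc; cases pvHoles.contains c <;> simp
        rw [if_pos ha, if_neg hc, ih, hc', ha]
        simp [Prod.ext_iff]; omega
    · have hc' : pvHoles.contains c = false := by
        cases hcc : pvHoles.contains c
        · rfl
        · exact absurd (pvHoles_alpha c hcc) ha
      have ha' : PySem.Chars.isalpha c = false := by
        revert ha; cases PySem.Chars.isalpha c <;> simp
      rw [if_neg ha, ih, hc', ha']
      simp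

-- B's fold over (key, count) pairs, split by class
lemma foldB (l : List (Char × Int)) (h n : Int) :
    l.foldl (fun acc kv =>
      if pvHoles.contains kv.1 then (acc.1 + kv.2, acc.2)
      else if PySem.Chars.isalpha kv.1 then (acc.1, acc.2 + kv.2)
      else acc) (h, n)
    = (h + (l.map (fun kv => if pvHoles.contains kv.1 then kv.2 else 0)).sum,
       n + (l.map (fun kv => if !pvHoles.contains kv.1 && PySem.Chars.isalpha kv.1 then kv.2 else 0)).sum) := by
  induction l generalizing h n with
  | nil => simp
  | cons kv t ih =>
    rw [List.foldl_cons, List.map_cons, List.map_cons, List.sum_cons, List.sum_cons]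
    by_cases hc : pvHoles.contains kv.1 = true
    · rw [if_pos hc, ih, hc]
      simp [Prod.ext_iff]; omega
    · have hc' : pvHoles.contains kv.1 = false := by
        revert hc; cases pvHoles.contains kv.1 <;> simp
      by_cases ha : PySem.Chars.isalpha kv.1 = true
      · rw [if_neg hc, if_pos ha, ih, hc', ha]
        simp [Prod.ext_iff]; omega
      · have ha' : PySem.Chars.isalpha kv.1 = false := by
          revert ha; cases PySem.Chars.isalpha kv.1 <;> simp
        rw [if_neg hc, if_neg ha, ih, hc', ha']
        simp

-- summing a character's multiplicity over the distinct characters = counting occurrences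
lemma sum_ofList_count (xs : List Char) (q : Char → Bool) :
    ((PySem.Set.ofList xs).map (fun k => if q k then (xs.count k : Int) else 0)).sum
      = (xs.countP q : Int) := by
  have hperm : ((PySem.Set.ofList xs).filter q).Perm (xs.dedup.filter q) := by
    apply List.perm_of_nodup_nodup_toFinset_eq
    · exact (PySem.Set.nodup_ofList xs).filter q
    · exact xs.nodup_dedup.filter q
    · ext c
      simp [PySem.Set.mem_ofList, List.mem_dedup]
  calc ((PySem.Set.ofList xs).map (fun k => if q k then (xs.count k : Int) else 0)).sum
      = (((PySem.Set.ofList xs).filter q).map (fun k => (xs.count k : Int))).sum := by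
        induction (PySem.Set.ofList xs) with
        | nil => simp
        | cons a t ih =>
          by_cases hq : q a = true <;> simp [hq, ih]
    _ = ((xs.dedup.filter q).map (fun k => (xs.count k : Int))).sum := by
        exact List.Perm.sum_eq (hperm.map _)
    _ = (xs.countP q : Int) := by
        rw [← List.sum_map_count_dedup_filter_eq_countP q xs]
        push_cast
        rw [List.map_map]
        simp [Function.comp_def]

-- ===== VERDICT (by name: the statement is the Claim_ definition above) =====
theorem count_hole_letters_spec : Claim_equal_count_hole_letters := by
  intro text _
  unfold Spec_count_hole_letters count_hole_letters count_hole_letters_alt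
  simp only [PySem.Dict.foldl_insert_getD_add_one_eq_counter, PySem.Dict.items_counter]
  rw [foldB, foldA]
  rw [List.map_map, List.map_map]
  have e1 : ((fun kv : Char × Int => if pvHoles.contains kv.1 then kv.2 else 0) ∘
      fun k => (k, (text.toList.count k : Int)))
      = fun k => if pvHoles.contains k then (text.toList.count k : Int) else 0 := rfl
  have e2 : ((fun kv : Char × Int => if !pvHoles.contains kv.1 && PySem.Chars.isalpha kv.1 then kv.2 else 0) ∘
      fun k => (k, (text.toList.count k : Int)))
      = fun k => if !pvHoles.contains k && PySem.Chars.isalpha k then (text.toList.count k : Int) else 0 := rfl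
  rw [e1, e2, sum_ofList_count, sum_ofList_count]
  have h2 : text.toList.countP (fun c => PySem.Chars.isalpha c && !pvHoles.contains c)
      = text.toList.countP (fun c => !pvHoles.contains c && PySem.Chars.isalpha c) := by
    apply List.countP_congr; intro c _; simp [Bool.and_comm]
  rw [h2]
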